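-- pv_equiv track=rewrite | github.com/J05hr/practice_problems | CC_Qs/theperfectteam.py | differentTeams
-- ===== SOURCE A (Python) =====
-- import math
--
-- def differentTeams(skills):
--     # check empty
--     if skills == "":
--         return 0
--
--     # get the skills set and make sure there are exactly 5
--     skillsset = set(skills)
--     if len(skillsset) != 5:
--         return 0
--
--     # check for min skill count and check for any other chars
--     minskill = math.inf
--     for item in skillsset:
--         if item not in "bcmpz":
--             return 0
--         if skills.count(item) < minskill:
--             minskill = skills.count(item)
--
--     return minskill
-- ===== SOURCE B (Python) =====
-- def differentTeams(skills):
--     # sort-then-scan: run-length encode the sorted characters; the run letters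
--     # must be exactly ['b','c','m','p','z'] and the answer is the smallest run.
--     letters = []
--     runs = []
--     for c in sorted(skills):
--         if letters and letters[-1] == c:
--             runs[-1] += 1
--         else:
--             letters.append(c)
--             runs.append(1)
--     if letters != ['b', 'c', 'm', 'p', 'z']:
--         return 0
--     return min(runs)
-- ===== Notes on version B (the rewrite author's own statement) =====
-- stated objective: alternative
-- what changed: B sorts the string and run-length encodes it in one scan, comparing the run letters to the literal sorted list ['b','c','m','p','z'] and taking the minimum run length, instead of A's set construction plus a validation loop with repeated skills.count rescans.
import Mathlib
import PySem

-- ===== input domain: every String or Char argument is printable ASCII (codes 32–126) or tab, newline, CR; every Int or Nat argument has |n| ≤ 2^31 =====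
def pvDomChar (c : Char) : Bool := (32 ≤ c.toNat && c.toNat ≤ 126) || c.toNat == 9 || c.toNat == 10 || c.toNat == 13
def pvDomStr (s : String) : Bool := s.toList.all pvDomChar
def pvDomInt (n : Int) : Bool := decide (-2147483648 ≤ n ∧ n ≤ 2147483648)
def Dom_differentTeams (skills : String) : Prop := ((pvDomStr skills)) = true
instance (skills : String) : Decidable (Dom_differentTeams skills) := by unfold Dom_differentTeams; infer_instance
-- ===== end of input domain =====

-- B sorts the string and run-length encodes it in one scan (run letters must be
-- exactly ['b','c','m','p','z'], answer = smallest run), replacing A's set build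
-- plus validation loop with repeated skills.count rescans; alternative, not faster.

-- ===== PORT A =====
-- math.inf as the running minimum is modelled by Option Int (none = inf); the
-- final 'return minskill' uses getD 0, reached with none only when the set is
-- empty, which the len == 5 guard excludes.
def pvLoopA (skills : String) : List Char → Option Int → Int
  | [], m => m.getD 0
  | item :: rest, m =>
    if item ∉ "bcmpz".toList then 0
    else
      let c : Int := (skills.toList.count item : Int)
      pvLoopA skills rest (if (match m with | none => true | some v => decide (c < v)) then some c else m)

def differentTeams (skills : String) : Int :=
  if skills == "" then 0
  else if PySem.Set.len (PySem.Set.ofList skills.toList) ≠ 5 then 0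
  else pvLoopA skills (PySem.Set.ofList skills.toList) none

-- ===== PORT B =====
-- runs[-1] += 1 on the (always nonempty there) runs list
def pvIncLast : List Int → List Int
  | [] => []
  | [k] => [k + 1]
  | k :: t => k :: pvIncLast t

-- one iteration of B's loop over the sorted characters
def pvStepB (st : List Char × List Int) (c : Char) : List Char × List Int :=
  if st.1 ≠ [] ∧ st.1.getLast? = some c then (st.1, pvIncLast st.2)
  else (st.1 ++ [c], st.2 ++ [1])

-- min(runs): Python min raises on [], unreachable here since the guard forces
-- letters (hence runs) to have 5 elements; getD 0 models that dead corner.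
def pvFinishB (st : List Char × List Int) : Int :=
  if st.1 ≠ ['b', 'c', 'm', 'p', 'z'] then 0
  else (PySem.List.min? st.2 (fun x => x)).getD 0

def differentTeams_alt (skills : String) : Int :=
  pvFinishB ((PySem.List.sorted skills.toList (fun x => x) false).foldl pvStepB ([], []))

-- ===== PRECONDITION & SPEC =====
def Spec_differentTeams (skills : String) (out : Int) : Prop := out = differentTeams_alt skills
instance (skills : String) (out : Int) : Decidable (Spec_differentTeams skills out) := by unfold Spec_differentTeams; infer_instance

-- ===== CLAIM (what is proved, stated in full; the proofs are below) =====
def Claim_equal_differentTeams : Prop := ∀ (skills : String), Dom_differentTeams skills → Spec_differentTeams skills (differentTeams skills)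

-- ===== LEMMAS AND PROOFS =====

-- ---- A-side characterisation (loop over the set) ----
theorem pvLoopA_of_invalid (skills : String) (l : List Char) (m : Option Int)
    (h : ∃ x ∈ l, x ∉ "bcmpz".toList) : pvLoopA skills l m = 0 := by
  induction l generalizing m with
  | nil => rcases h with ⟨x, hx, _⟩; cases hx
  | cons a t ih =>
    by_cases ha : a ∈ "bcmpz".toList
    · rcases h with ⟨x, hx, hxv⟩
      rcases List.mem_cons.mp hx with rfl | hxt
      · exact absurd ha hxv
      · simp only [pvLoopA, ha, not_true_eq_false, if_false]
        exact ih _ ⟨x, hxt, hxv⟩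
    · simp only [pvLoopA]
      rw [if_pos ha]

theorem pvLoopA_of_valid_some (skills : String) (l : List Char) (a : Int)
    (h : ∀ x ∈ l, x ∈ "bcmpz".toList) :
    pvLoopA skills l (some a) = (l.map (fun x => (skills.toList.count x : Int))).foldl min a := by
  induction l generalizing a with
  | nil => simp [pvLoopA]
  | cons c t ih =>
    have hc : c ∈ "bcmpz".toList := h c (by simp)
    simp only [pvLoopA, hc, not_true_eq_false, if_false, List.map_cons, List.foldl_cons]
    rw [show (if decide ((skills.toList.count c : Int) < a) = true then
          some (skills.toList.count c : Int) else some a)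
        = some (min a (skills.toList.count c : Int)) by
      split_ifs with hlt <;> simp_all [min_def]]
    exact ih _ (fun x hx => h x (List.mem_cons_of_mem _ hx))

theorem pvLoopA_of_valid (skills : String) (c : Char) (t : List Char)
    (h : ∀ x ∈ c :: t, x ∈ "bcmpz".toList) :
    pvLoopA skills (c :: t) none
      = (((c :: t).map (fun x => (skills.toList.count x : Int))).min?).getD 0 := by
  have hc : c ∈ "bcmpz".toList := h c (by simp)
  simp only [pvLoopA, hc, not_true_eq_false, if_false]
  rw [if_pos trivial, pvLoopA_of_valid_some skills t _ (fun x hx => h x (List.mem_cons_of_mem _ hx))]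
  rw [List.map_cons, List.min?_cons']
  rfl

-- ---- B-side characterisation (run-length encoding of a sorted list) ----

-- the front-recursive form of B's fold: current run letter a seen k times
def pvG (a : Char) (k : Int) : List Char → List Char × List Int
  | [] => ([a], [k])
  | c :: t => if c = a then pvG a (k + 1) t else (a :: (pvG c 1 t).1, k :: (pvG c 1 t).2)

-- dedup of adjacent equal elements (the run letters)
def pvDds : List Char → List Char
  | [] => []
  | [a] => [a]
  | a :: b :: t => if a = b then pvDds (b :: t) else a :: pvDds (b :: t)

theorem pvIncLast_append (rs : List Int) (k : Int) : pvIncLast (rs ++ [k]) = rs ++ [k + 1] := by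
  induction rs with
  | nil => rfl
  | cons x t ih =>
    cases t with
    | nil => simp [pvIncLast]
    | cons y u => simpa [pvIncLast] using ih

theorem pvFoldB (l : List Char) : ∀ (ls : List Char) (rs : List Int) (a : Char) (k : Int),
    l.foldl pvStepB (ls ++ [a], rs ++ [k]) = (ls ++ (pvG a k l).1, rs ++ (pvG a k l).2) := by
  induction l with
  | nil => intro ls rs a k; simp [pvG]
  | cons c t ih =>
    intro ls rs a k
    rw [List.foldl_cons]
    by_cases hca : c = a
    · subst hca
      have hstep : pvStepB (ls ++ [c], rs ++ [k]) c = (ls ++ [c], rs ++ [k + 1]) := by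
        simp [pvStepB, pvIncLast_append]
      rw [hstep, ih]
      have hg : pvG c k (c :: t) = pvG c (k + 1) t := by rw [pvG, if_pos rfl]
      rw [hg]
    · have hstep : pvStepB (ls ++ [a], rs ++ [k]) c = (ls ++ [a] ++ [c], rs ++ [k] ++ [1]) := by
        simp only [pvStepB, List.getLast?_concat, ne_eq, List.append_eq_nil_iff,
          List.cons_ne_nil, and_false, not_false_eq_true, Option.some.injEq, true_and]
        rw [if_neg (fun h => hca h.symm)]
      rw [hstep, ih (ls ++ [a]) (rs ++ [k]) c 1]
      have hg : pvG a k (c :: t) = (a :: (pvG c 1 t).1, k :: (pvG c 1 t).2) := by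
        rw [pvG, if_neg hca]
      rw [hg]
      simp [List.append_assoc]

theorem pvDds_mem (l : List Char) (x : Char) : x ∈ pvDds l ↔ x ∈ l := by
  induction l with
  | nil => simp [pvDds]
  | cons a t ih =>
    cases t with
    | nil => simp [pvDds]
    | cons b u =>
      by_cases hab : a = b
      · subst hab
        rw [show pvDds (a :: a :: u) = pvDds (a :: u) by rw [pvDds, if_pos rfl], ih]
        simp
      · rw [show pvDds (a :: b :: u) = a :: pvDds (b :: u) by rw [pvDds, if_neg hab]]
        rw [List.mem_cons, List.mem_cons, ih]

theorem pvDds_pairwise_lt (l : List Char) (h : l.Pairwise (· ≤ ·)) :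
    (pvDds l).Pairwise (· < ·) := by
  induction l with
  | nil => simp [pvDds]
  | cons a t ih =>
    cases t with
    | nil => simp [pvDds]
    | cons b u =>
      have hle : a ≤ b := (List.pairwise_cons.mp h).1 b (by simp)
      have htail : (b :: u).Pairwise (· ≤ ·) := (List.pairwise_cons.mp h).2
      by_cases hab : a = b
      · subst hab
        rw [show pvDds (a :: a :: u) = pvDds (a :: u) by rw [pvDds, if_pos rfl]]
        exact ih htail
      · have halt : a < b := lt_of_le_of_ne hle hab
        rw [show pvDds (a :: b :: u) = a :: pvDds (b :: u) by rw [pvDds, if_neg hab]]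
        refine List.pairwise_cons.mpr ⟨?_, ih htail⟩
        intro x hx
        have hxm : x ∈ b :: u := (pvDds_mem _ _).mp hx
        rcases List.mem_cons.mp hxm with rfl | hxu
        · exact halt
        · exact lt_of_lt_of_le halt ((List.pairwise_cons.mp htail).1 x hxu)

theorem pvG_sorted (l : List Char) : ∀ (a : Char) (k : Int), (a :: l).Pairwise (· ≤ ·) →
    pvG a k l = (pvDds (a :: l),
      (pvDds (a :: l)).map (fun x => (if x = a then k - 1 else 0) + ((a :: l).count x : Int))) := by
  induction l with
  | nil =>
    intro a k _
    simp [pvG, pvDds, List.count_cons]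
  | cons c t ih =>
    intro a k h
    have htail : (c :: t).Pairwise (· ≤ ·) := (List.pairwise_cons.mp h).2
    by_cases hca : c = a
    · subst hca
      have h' : (c :: t).Pairwise (· ≤ ·) := htail
      rw [show pvG c k (c :: t) = pvG c (k + 1) t by rw [pvG, if_pos rfl]]
      rw [ih c (k + 1) h']
      have hdds : pvDds (c :: c :: t) = pvDds (c :: t) := by rw [pvDds, if_pos rfl]
      rw [hdds]
      congr 1
      apply List.map_congr_left
      intro x _
      by_cases hxc : x = c
      · subst hxc
        rw [if_pos rfl, if_pos rfl]
        simp only [List.count_cons_self]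
        push_cast
        ring
      · rw [if_neg hxc, if_neg hxc,
          show (c :: c :: t).count x = (c :: t).count x from List.count_cons_of_ne (Ne.symm hxc)]
    · -- new run starts at c; a is strictly below everything in c :: t
      have hle : a ≤ c := (List.pairwise_cons.mp h).1 c (by simp)
      have halt : a < c := lt_of_le_of_ne hle (fun e => hca e.symm)
      have hnotmem : a ∉ c :: t := by
        intro hm
        rcases List.mem_cons.mp hm with rfl | hmt
        · exact hca rfl
        · exact absurd ((List.pairwise_cons.mp htail).1 a hmt) (not_le.mpr halt)
      rw [show pvG a k (c :: t) = (a :: (pvG c 1 t).1, k :: (pvG c 1 t).2) by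
          rw [pvG, if_neg hca]]
      rw [ih c 1 htail]
      have hdds : pvDds (a :: c :: t) = a :: pvDds (c :: t) := by
        rw [pvDds, if_neg (fun h => hca h.symm)]
      rw [hdds, List.map_cons]
      have hz : (c :: t).count a = 0 := List.count_eq_zero.mpr hnotmem
      congr 1
      congr 1
      · -- head run value: k = (k - 1) + count a (a :: c :: t), count a (c :: t) = 0
        rw [if_pos rfl, List.count_cons_self, hz]
        push_cast
        ring
      · apply List.map_congr_left
        intro x hx
        have hxm : x ∈ c :: t := (pvDds_mem _ _).mp hx
        have hxa : x ≠ a := fun e => hnotmem (e ▸ hxm)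
        rw [if_neg hxa,
          show (a :: c :: t).count x = (c :: t).count x from List.count_cons_of_ne (Ne.symm hxa)]
        by_cases hxc : x = c
        · subst hxc
          rw [if_pos rfl]
          norm_num
        · rw [if_neg hxc]

-- B's fold on the sorted list yields the run letters and their counts
theorem pvFoldB_char (cs : List Char) :
    (PySem.List.sorted cs (fun x => x) false).foldl pvStepB ([], [])
      = (pvDds (PySem.List.sorted cs (fun x => x) false),
         (pvDds (PySem.List.sorted cs (fun x => x) false)).map (fun x => (cs.count x : Int))) := by
  have hpw : (PySem.List.sorted cs (fun x => x) false).Pairwise (· ≤ ·) :=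
    PySem.List.sorted_pairwise cs (fun x => x)
  have hperm : (PySem.List.sorted cs (fun x => x) false).Perm cs :=
    PySem.List.sorted_perm cs (fun x => x) false
  cases hcase : PySem.List.sorted cs (fun x => x) false with
  | nil => simp [pvDds]
  | cons c u =>
    rw [hcase] at hpw hperm
    rw [List.foldl_cons]
    have hstep : pvStepB ([], []) c = ([] ++ [c], [] ++ [(1 : Int)]) := by
      simp [pvStepB]
    rw [hstep, pvFoldB u [] [] c 1, pvG_sorted u c 1 hpw]
    simp only [List.nil_append, Prod.mk.injEq, true_and]
    apply List.map_congr_left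
    intro x _
    have hcnt : (c :: u).count x = cs.count x := hperm.count_eq x
    by_cases hxc : x = c
    · subst hxc; simp [hcnt]
    · simp [hxc, hcnt]

-- first-extremal min with id key over permuted nonempty lists: the VALUE is the minimum
theorem pvMin_perm (c : Int) (u : List Int) (c' : Int) (u' : List Int)
    (h : (c :: u).Perm (c' :: u')) :
    (PySem.List.min? (c :: u) (fun x => x)).getD 0
      = (PySem.List.min? (c' :: u') (fun x => x)).getD 0 := by
  rw [PySem.List.min?_id_cons, PySem.List.min?_id_cons]
  have h1 : (c :: u).min? = some (u.foldl min c) := List.min?_cons'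
  have h2 : (c' :: u').min? = some (u'.foldl min c') := List.min?_cons'
  rw [List.min?_eq_some_iff] at h1 h2
  have ha := h2.2 _ (h.mem_iff.mp h1.1)
  have hb := h1.2 _ (h.mem_iff.mpr h2.1)
  simp only [Option.getD_some]
  omega

theorem differentTeams_spec_aux (skills : String) :
    differentTeams skills = differentTeams_alt skills := by
  unfold differentTeams differentTeams_alt
  rw [pvFoldB_char skills.toList]
  set cs := skills.toList with hcs
  set t := PySem.List.sorted cs (fun x => x) false with ht
  set S : PySem.Set Char := PySem.Set.ofList cs with hS
  set L : List Char := pvDds t with hL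
  set target : List Char := ['b', 'c', 'm', 'p', 'z'] with htarget
  have hstr : "bcmpz".toList = target := by decide
  have hSnd : S.Nodup := PySem.Set.nodup_ofList _
  have hpwL : L.Pairwise (· < ·) := pvDds_pairwise_lt t (by
    rw [ht]; exact PySem.List.sorted_pairwise cs (fun x => x))
  have hLnd : L.Nodup := hpwL.nodup
  have hmemL : ∀ x, x ∈ L ↔ x ∈ cs := by
    intro x
    rw [hL, pvDds_mem, ht]
    exact PySem.List.mem_sorted cs (fun x => x) false x
  have hmemS : ∀ x, x ∈ S ↔ x ∈ cs := fun x => PySem.Set.mem_ofList cs x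
  have hSL : S.Perm L := (List.perm_ext_iff_of_nodup hSnd hLnd).mpr
      (fun x => (hmemS x).trans (hmemL x).symm)
  by_cases hLt : L = target
  · -- valid team: both sides return the min count
    have hmemT : ∀ x, x ∈ S ↔ x ∈ target := by
      intro x; rw [hmemS, ← hmemL x, hLt]
    have hSlen : S.length = 5 := by rw [hSL.length_eq, hLt]; rfl
    have hSne : S ≠ [] := by intro h0; rw [h0] at hSlen; simp at hSlen
    have hne : ¬ (skills == "") = true := by
      intro h
      have : skills = "" := by simpa using h
      subst this
      exact hSne (by rw [hS]; decide)
    rw [if_neg hne]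
    have hlen5 : PySem.Set.len S = 5 := by
      simp [PySem.Set.len, hSlen]
    rw [if_neg (show ¬ PySem.Set.len S ≠ 5 by rw [hlen5]; exact fun h => h rfl)]
    obtain ⟨c, u, hcu⟩ : ∃ c u, S = c :: u := by
      cases hS' : S with
      | nil => exact absurd hS' hSne
      | cons c u => exact ⟨c, u, rfl⟩
    have hvalid : ∀ x ∈ c :: u, x ∈ "bcmpz".toList := by
      intro x hx
      rw [hstr]
      exact (hmemT x).mp (hcu ▸ hx)
    rw [hcu, pvLoopA_of_valid skills c u hvalid]
    unfold pvFinishB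
    rw [if_neg (show ¬ (pvDds t, L.map fun x => (cs.count x : Int)).1 ≠ target by
      simp [← hL, hLt])]
    have hconv : (((c :: u).map (fun x => (cs.count x : Int))).min?).getD 0
        = (PySem.List.min? ((c :: u).map (fun x => (cs.count x : Int))) (fun x => x)).getD 0 := by
      rw [List.map_cons, List.min?_cons', PySem.List.min?_id_cons]
    rw [hconv]
    have hLcons : L = 'b' :: ['c', 'm', 'p', 'z'] := hLt
    have hperm2 : ((c :: u).map (fun x => (cs.count x : Int))).Perm
        (('b' :: ['c', 'm', 'p', 'z']).map (fun x => (cs.count x : Int))) := by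
      rw [← hLcons]
      exact (hcu ▸ hSL).map _
    rw [show (pvDds t, L.map fun x => (cs.count x : Int)).2 = L.map (fun x => (cs.count x : Int)) from rfl,
      hLcons]
    rw [List.map_cons] at hperm2 ⊢
    exact pvMin_perm _ _ _ _ hperm2
  · -- invalid: A must return 0 = B
    unfold pvFinishB
    rw [if_pos (show (pvDds t, L.map fun x => (cs.count x : Int)).1 ≠ target by simp [← hL, hLt])]
    by_cases hne : (skills == "") = true
    · rw [if_pos hne]
    · rw [if_neg hne]
      by_cases hlen : PySem.Set.len S ≠ 5
      · rw [if_pos hlen]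
      · rw [if_neg hlen]
        push Not at hlen
        have hSlen : S.length = 5 := by
          have : (S.length : Int) = 5 := by simpa [PySem.Set.len] using hlen
          exact_mod_cast this
        -- some character of S is invalid, else L would equal target
        have hinv : ∃ x ∈ S, x ∉ "bcmpz".toList := by
          by_contra hall
          push Not at hall
          apply hLt
          have htnd : target.Nodup := by rw [htarget]; decide
          have hsub : S.toFinset ⊆ target.toFinset := by
            intro y hy
            rw [List.mem_toFinset] at *
            rw [← hstr]
            exact hall y hy
          have hcardS : S.toFinset.card = 5 := by
            rw [List.toFinset_card_of_nodup hSnd, hSlen]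
          have heqF : S.toFinset = target.toFinset :=
            Finset.eq_of_subset_of_card_le hsub (by rw [hcardS, htarget]; decide)
          have hmem : ∀ x, x ∈ L ↔ x ∈ target := by
            intro x
            rw [hmemL, ← hmemS, ← List.mem_toFinset, heqF, List.mem_toFinset]
          have hperm : target.Perm L :=
            (List.perm_ext_iff_of_nodup htnd hLnd).mpr (fun x => (hmem x).symm)
          have hpwT : target.Pairwise (· < ·) := by rw [htarget]; decide
          have h1 : PySem.List.sorted L (fun x => x) = target :=
            PySem.List.sorted_eq_of_perm_of_pairwise_lt L target (fun x => x) hperm hpwT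
          have h2 : PySem.List.sorted L (fun x => x) = L :=
            PySem.List.sorted_eq_self_of_pairwise L (fun x => x) (hpwL.imp (fun h => le_of_lt h))
          rw [← h2, h1]
        exact pvLoopA_of_invalid skills S none hinv

-- ===== VERDICT (by name: the statement is the Claim_ definition above) =====
theorem differentTeams_spec : Claim_equal_differentTeams := by
  intro skills _
  exact differentTeams_spec_aux skills
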